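-- pv_equiv track=rewrite | github.com/Sfera-IT/adventofcode2020 | the_maxtor/day5/puzzle10.py | get_column_number
-- ===== SOURCE A (Python) =====
-- import math
--
-- def get_column_number(seatCode, col):
--     if not seatCode:
--         return col
--     if seatCode[0] == "R":
--         col[0] = math.ceil((col[0] + col[1])/2)
--     elif seatCode[0] == "L":
--         col[1] = math.floor((col[0] + col[1])/2)
--     get_column_number(seatCode[1:], col)
--     return col
-- ===== SOURCE B (Python) =====
-- def get_column_number(seatCode, col):
--     moves = [c for c in seatCode if c in "RL"]
--     if moves:
--         lo, hi = col[0], col[1]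
--         for c in moves:
--             if c == "R":
--                 lo = (lo + hi + 1) // 2
--             else:
--                 hi = (lo + hi) // 2
--         col[0], col[1] = lo, hi
--     return col
-- ===== Notes on version B (the rewrite author's own statement) =====
-- stated objective: faster
-- what changed: Replaces A's tail recursion on string slices with incremental list writes by one iterative pass over the pre-filtered R/L moves on two scalar accumulators (using integer ceiling/floor division instead of float math.ceil/floor), writing into col once at the end.
import Mathlib
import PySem

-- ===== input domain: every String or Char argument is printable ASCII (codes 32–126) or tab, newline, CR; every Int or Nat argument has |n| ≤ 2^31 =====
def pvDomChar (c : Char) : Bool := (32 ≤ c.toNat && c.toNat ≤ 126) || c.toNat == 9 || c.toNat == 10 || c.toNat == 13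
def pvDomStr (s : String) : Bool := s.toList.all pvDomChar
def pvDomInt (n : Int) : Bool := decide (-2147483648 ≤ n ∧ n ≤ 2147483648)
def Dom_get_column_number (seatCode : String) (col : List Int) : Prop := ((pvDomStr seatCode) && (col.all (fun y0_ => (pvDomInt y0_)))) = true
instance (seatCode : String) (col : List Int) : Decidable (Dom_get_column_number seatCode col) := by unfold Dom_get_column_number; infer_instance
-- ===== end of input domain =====

-- B replaces A's tail recursion with slicing by a single pass over the pre-filtered R/L moves
-- on two scalar accumulators, writing back into col once at the end (objective: faster — no per-step string slicing;
-- return value AND the in-place mutation of col coincide with A's on Pre_).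

-- ===== PORT A =====
-- A mutates col in place; the recursion threads the mutated list, and 'return col' is that list.
-- col[0]/col[1] reads use getD 0: on Pre_ they are always in range (Python would raise otherwise).
-- math.ceil((a+b)/2) on these exact-float sums is ceiling division, ported as (a+b+1) // 2;
-- math.floor((a+b)/2) is (a+b) // 2 (PySem.Int.floordiv).
def get_column_number_rec : List Char → List Int → List Int
  | [], col => col
  | c :: rest, col =>
    let col :=
      if c = 'R' then col.set 0 (PySem.Int.floordiv (col.getD 0 0 + col.getD 1 0 + 1) 2)
      else if c = 'L' then col.set 1 (PySem.Int.floordiv (col.getD 0 0 + col.getD 1 0) 2)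
      else col
    get_column_number_rec rest col

def get_column_number (seatCode : String) (col : List Int) : List Int :=
  get_column_number_rec seatCode.toList col

-- ===== PORT B =====
def get_column_number_alt_step (p : Int × Int) (c : Char) : Int × Int :=
  if c = 'R' then (PySem.Int.floordiv (p.1 + p.2 + 1) 2, p.2)
  else (p.1, PySem.Int.floordiv (p.1 + p.2) 2)

def get_column_number_alt (seatCode : String) (col : List Int) : List Int :=
  let moves := seatCode.toList.filter (fun c => c = 'R' ∨ c = 'L')
  if moves = [] then col
  else
    let p := moves.foldl get_column_number_alt_step (col.getD 0 0, col.getD 1 0)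
    (col.set 0 p.1).set 1 p.2

-- ===== PRECONDITION & SPEC =====
-- Pre_ excludes exactly the inputs where Python A raises IndexError: an R/L move with col shorter than 2.
def Pre_get_column_number (seatCode : String) (col : List Int) : Prop :=
  ('R' ∈ seatCode.toList ∨ 'L' ∈ seatCode.toList) → 2 ≤ col.length
instance (seatCode : String) (col : List Int) : Decidable (Pre_get_column_number seatCode col) := by unfold Pre_get_column_number; infer_instance
def pvWitness_get_column_number : String × List Int := ("RLR", [0, 127])

def Spec_get_column_number (seatCode : String) (col : List Int) (out : List Int) : Prop := out = get_column_number_alt seatCode col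
instance (seatCode : String) (col : List Int) (out : List Int) : Decidable (Spec_get_column_number seatCode col out) := by unfold Spec_get_column_number; infer_instance

-- ===== CLAIM (what is proved, stated in full; the proofs are below) =====
def Claim_equal_get_column_number : Prop := ∀ (seatCode : String) (col : List Int), Dom_get_column_number seatCode col → Pre_get_column_number seatCode col → Spec_get_column_number seatCode col (get_column_number seatCode col)

-- ===== LEMMAS AND PROOFS =====

lemma rec_eq_fold (cs : List Char) (col : List Int) (h2 : 2 ≤ col.length) :
    get_column_number_rec cs col =
      (col.set 0 ((cs.filter (fun c => c = 'R' ∨ c = 'L')).foldl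
          get_column_number_alt_step (col.getD 0 0, col.getD 1 0)).1).set 1
        ((cs.filter (fun c => c = 'R' ∨ c = 'L')).foldl
          get_column_number_alt_step (col.getD 0 0, col.getD 1 0)).2 := by
  induction cs generalizing col with
  | nil =>
    simp [get_column_number_rec, List.filter]
    obtain ⟨a, b, rest, rfl⟩ : ∃ a b rest, col = a :: b :: rest := by
      match col, h2 with
      | a :: b :: rest, _ => exact ⟨a, b, rest, rfl⟩
    simp [List.set]
  | cons c cs ih =>
    obtain ⟨a, b, rest, rfl⟩ : ∃ a b rest, col = a :: b :: rest := by
      match col, h2 with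
      | a :: b :: rest, _ => exact ⟨a, b, rest, rfl⟩
    by_cases hR : c = 'R'
    · subst hR
      simp only [get_column_number_rec, if_pos rfl]
      rw [ih _ (by simp)]
      simp [get_column_number_alt_step, List.filter, List.set]
    · by_cases hL : c = 'L'
      · subst hL
        simp only [get_column_number_rec]
        rw [if_neg (by decide : ¬ ('L' : Char) = 'R')]
        simp only [if_true]
        rw [ih _ (by simp)]
        simp [get_column_number_alt_step, List.filter, List.set]
      · simp only [get_column_number_rec, if_neg hR, if_neg hL]
        rw [ih _ (by simp)]
        have : (c = 'R' ∨ c = 'L') = False := by simp [hR, hL]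
        simp [List.filter, this]

lemma filter_empty_of_none (cs : List Char) (h : ¬ ('R' ∈ cs ∨ 'L' ∈ cs)) :
    cs.filter (fun c => c = 'R' ∨ c = 'L') = [] := by
  rw [List.filter_eq_nil_iff]
  intro c hc
  simp only [decide_eq_true_eq]
  rintro (rfl | rfl) <;> exact h (by simp [hc])

lemma rec_id_of_none (cs : List Char) (col : List Int) (h : ¬ ('R' ∈ cs ∨ 'L' ∈ cs)) :
    get_column_number_rec cs col = col := by
  induction cs with
  | nil => rfl
  | cons c cs ih =>
    have hR : c ≠ 'R' := fun e => h (Or.inl (e ▸ List.mem_cons_self ..))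
    have hL : c ≠ 'L' := fun e => h (Or.inr (e ▸ List.mem_cons_self ..))
    simp only [get_column_number_rec, if_neg hR, if_neg hL]
    exact ih (fun hc => h (by rcases hc with h' | h' <;> [exact Or.inl (List.mem_cons_of_mem _ h'); exact Or.inr (List.mem_cons_of_mem _ h')]))

-- ===== VERDICT (by name: the statement is the Claim_ definition above) =====
theorem get_column_number_spec : Claim_equal_get_column_number := by
  intro seatCode col _ hpre
  unfold Spec_get_column_number get_column_number get_column_number_alt
  by_cases hm : 'R' ∈ seatCode.toList ∨ 'L' ∈ seatCode.toList
  · have h2 := hpre hm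
    have hne : seatCode.toList.filter (fun c => c = 'R' ∨ c = 'L') ≠ [] := by
      rw [Ne, List.filter_eq_nil_iff]
      push_neg
      rcases hm with h | h
      · exact ⟨'R', h, by simp⟩
      · exact ⟨'L', h, by simp⟩
    simp only [if_neg hne]
    exact rec_eq_fold _ _ h2
  · rw [rec_id_of_none _ _ hm, if_pos (filter_empty_of_none _ hm)]
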